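-- pv_equiv track=rewrite | github.com/AdLucem/Linguistics-2-Project | twitest_for_feature_2.py | feature_1
-- ===== SOURCE A (Python) =====
-- def wordlen(tag) :
--
--     length = 0
--
--     if(len(tag) == 0) :
--         length = 0
--     elif len(tag.split("_")) > 1 :
--         length = len(tag.split("_"))
--     else :
--         try :
--             wordlist = []
--             word = ""
--             for i in range(len(tag)) :
--                 word += tag[i]
--                 if(tag[i+1]) in "ABCDEFGHIJKLMNOPQRSTSUVWXYZ" and tag[i] in "abcdefghijklmnopqrstuvwxyz" :
--                     wordlist.append(word)
--                     word = ""
--         except IndexError :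
--             wordlist.append(word)
--         finally :
--             if len(wordlist) > 1 :
--                 length = len(wordlist)
--             else :
--                 if(len(tag)>30) :
--                     length = len(tag)
--     return length
--
-- def feature_1(tagstr) :
--
--
--     flag = False
--     tagset = tagstr.split("$^$")
--
--     if len(tagset) > 0 :
--         for i in tagset :
--             if wordlen(i) > 2 :
--                 flag = True
--                 break
--     return flag
-- ===== SOURCE B (Python) =====
-- LOWER = set("abcdefghijklmnopqrstuvwxyz")
-- UPPER = set("ABCDEFGHIJKLMNOPQRSTUVWXYZ")
--
--
-- def wordlen_alt(tag):
--     if not tag: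
--         return 0
--     parts = tag.split("_")
--     if len(parts) > 1:
--         return len(parts)
--     words = 1 + sum(1 for i in range(len(tag) - 1)
--                     if tag[i] in LOWER and tag[i + 1] in UPPER)
--     if words > 1:
--         return words
--     return len(tag) if len(tag) > 30 else 0
--
--
-- def feature_1(tagstr):
--     return any(wordlen_alt(t) > 2 for t in tagstr.split("$^$"))
-- ===== Notes on version B (the rewrite author's own statement) =====
-- stated objective: simpler
-- what changed: wordlen's accumulator loop with try/except-IndexError is replaced by a direct count: 1 + number of lower-to-upper transitions over range(len-1), with no word list, no exception handling and no duplicated letter in the uppercase alphabet; feature_1's flag/break loop becomes any().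
import Mathlib
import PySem

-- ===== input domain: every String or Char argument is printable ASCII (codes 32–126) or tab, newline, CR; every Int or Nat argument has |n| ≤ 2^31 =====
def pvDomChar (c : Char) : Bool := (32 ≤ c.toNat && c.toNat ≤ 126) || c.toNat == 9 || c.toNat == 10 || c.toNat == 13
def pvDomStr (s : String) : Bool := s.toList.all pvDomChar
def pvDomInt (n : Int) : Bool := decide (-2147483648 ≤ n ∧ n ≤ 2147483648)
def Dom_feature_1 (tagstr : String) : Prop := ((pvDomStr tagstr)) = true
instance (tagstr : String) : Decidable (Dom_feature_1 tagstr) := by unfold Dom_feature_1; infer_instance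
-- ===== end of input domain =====

-- B replaces A's word-accumulator loop with try/except by a direct 1 + transition count, and the flag/break loop by any(); objective: simpler.

-- ===== PORT A =====
-- A's uppercase alphabet, verbatim (note the duplicated letter)
def upperA : List Char := "ABCDEFGHIJKLMNOPQRSTSUVWXYZ".toList
def lowerA : List Char := "abcdefghijklmnopqrstuvwxyz".toList

-- the 'for i in range(len(tag))' loop of wordlen: word accumulator, wordlist;
-- reading tag[i+1] past the end is the IndexError → append word and leave the loop
def wordlenLoop (tag : List Char) : Nat → List Char → List (List Char) → List (List Char)
  | i, word, wordlist =>
    if h : i < tag.length then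
      let word' := word ++ [tag[i]]
      match tag[i+1]? with
      | none => wordlist ++ [word']          -- IndexError branch
      | some c =>
        if upperA.contains c && lowerA.contains tag[i] then
          wordlenLoop tag (i+1) [] (wordlist ++ [word'])
        else
          wordlenLoop tag (i+1) word' wordlist
    else wordlist                            -- loop exhausted (only for empty tag)
  termination_by i _ _ => tag.length - i

def wordlen (tag : String) : Int :=
  let t := tag.toList
  if t.length = 0 then 0
  else if ((PySem.Str.split? tag "_").getD []).length > 1 then
    ((PySem.Str.split? tag "_").getD []).length
  else
    let wordlist := wordlenLoop t 0 [] []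
    if wordlist.length > 1 then wordlist.length
    else if t.length > 30 then t.length else 0

def feat1Loop : List String → Bool
  | [] => false
  | t :: ts => if wordlen t > 2 then true else feat1Loop ts

def feature_1 (tagstr : String) : Bool :=
  let tagset := (PySem.Str.split? tagstr "$^$").getD []
  if tagset.length > 0 then feat1Loop tagset else false

-- ===== PORT B =====
def lowerB : List Char := "abcdefghijklmnopqrstuvwxyz".toList
def upperB : List Char := "ABCDEFGHIJKLMNOPQRSTUVWXYZ".toList

def wordlen_altB (tag : String) : Int :=
  let t := tag.toList
  if t.length = 0 then 0
  else
    let parts := (PySem.Str.split? tag "_").getD []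
    if parts.length > 1 then parts.length
    else
      let words : Int := 1 + ((List.range (t.length - 1)).filter
        (fun i => lowerB.contains (t.getD i ' ') && upperB.contains (t.getD (i+1) ' '))).length
      if words > 1 then words
      else if t.length > 30 then t.length else 0

def feature_1_alt (tagstr : String) : Bool :=
  ((PySem.Str.split? tagstr "$^$").getD []).any (fun t => wordlen_altB t > 2)

-- ===== PRECONDITION & SPEC =====
def Spec_feature_1 (tagstr : String) (out : Bool) : Prop := out = feature_1_alt tagstr
instance (tagstr : String) (out : Bool) : Decidable (Spec_feature_1 tagstr out) := by unfold Spec_feature_1; infer_instance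

-- ===== CLAIM (what is proved, stated in full; the proofs are below) =====
def Claim_equal_feature_1 : Prop := ∀ (tagstr : String), Dom_feature_1 tagstr → Spec_feature_1 tagstr (feature_1 tagstr)

-- ===== LEMMAS AND PROOFS =====

-- the two uppercase alphabets agree as membership tests (the duplicated letter is redundant)
theorem lowerA_eq_lowerB : lowerA = lowerB := rfl

theorem upperA_eq_upperB (c : Char) : upperA.contains c = upperB.contains c := by
  have h : upperA = upperB.take 20 ++ 'S' :: upperB.drop 20 := by decide
  have hS : 'S' ∈ upperB := by decide
  have ht : upperB.take 20 ++ upperB.drop 20 = upperB := List.take_append_drop 20 upperB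
  rw [Bool.eq_iff_iff, List.contains_iff_mem, List.contains_iff_mem, h]
  constructor
  · intro hm
    rcases List.mem_append.1 hm with h1 | h2
    · rw [← ht]; exact List.mem_append.2 (Or.inl h1)
    · rcases List.mem_cons.1 h2 with rfl | h3
      · exact hS
      · rw [← ht]; exact List.mem_append.2 (Or.inr h3)
  · intro hm
    rw [← ht] at hm
    rcases List.mem_append.1 hm with h1 | h2
    · exact List.mem_append.2 (Or.inl h1)
    · exact List.mem_append.2 (Or.inr (List.mem_cons.2 (Or.inr h2)))

-- the transition test of B at position i
def transAt (t : List Char) (i : Nat) : Bool :=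
  lowerB.contains (t.getD i ' ') && upperB.contains (t.getD (i+1) ' ')

-- loop invariant: the final wordlist length is the incoming one plus 1 plus the
-- number of lower-to-upper transition positions j with i <= j < len - 1
theorem wordlenLoop_length (t : List Char) (i : Nat) (word : List Char) (wl : List (List Char)) (h : i < t.length) :
    (wordlenLoop t i word wl).length =
      wl.length + 1 + ((List.range' i (t.length - 1 - i)).filter (transAt t)).length := by
  unfold wordlenLoop
  rw [dif_pos h]
  by_cases h2 : i + 1 < t.length
  · rw [List.getElem?_eq_getElem h2]
    dsimp only
    have hcons : List.range' i (t.length - 1 - i) = i :: List.range' (i+1) (t.length - 1 - (i+1)) := by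
      have hr : t.length - 1 - i = (t.length - 1 - (i+1)) + 1 := by omega
      rw [hr]; simp [List.range']
    have htrans : transAt t i = (upperA.contains t[i+1] && lowerA.contains t[i]) := by
      simp only [transAt, List.getD_eq_getElem _ _ h, List.getD_eq_getElem _ _ h2,
        upperA_eq_upperB, lowerA_eq_lowerB]
      rw [Bool.and_comm]
    by_cases hc : (upperA.contains t[i+1] && lowerA.contains t[i]) = true
    · rw [if_pos hc, wordlenLoop_length t (i+1) [] (wl ++ [word ++ [t[i]]]) h2,
        hcons, List.filter_cons_of_pos (htrans.trans hc)]
      simp; omega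
    · rw [if_neg hc, wordlenLoop_length t (i+1) (word ++ [t[i]]) wl h2,
        hcons, List.filter_cons_of_neg (by rw [htrans]; exact hc)]
  · rw [List.getElem?_eq_none (by omega)]
    have : t.length - 1 - i = 0 := by omega
    simp [this]
termination_by t.length - i

theorem wordlen_eq (tag : String) : wordlen tag = wordlen_altB tag := by
  simp only [wordlen, wordlen_altB]
  by_cases h0 : tag.toList.length = 0
  · rw [if_pos h0, if_pos h0]
  · rw [if_neg h0, if_neg h0]
    by_cases hp : ((PySem.Str.split? tag "_").getD []).length > 1
    · rw [if_pos hp, if_pos hp]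
    · rw [if_neg hp, if_neg hp,
        wordlenLoop_length tag.toList 0 [] [] (by omega),
        show (fun i => lowerB.contains (tag.toList.getD i ' ') &&
            upperB.contains (tag.toList.getD (i+1) ' ')) = transAt tag.toList from rfl,
        show List.range (tag.toList.length - 1) = List.range' 0 (tag.toList.length - 1 - 0)
          from List.range_eq_range']
      set n := ((List.range' 0 (tag.toList.length - 1 - 0)).filter (transAt tag.toList)).length
      simp only [List.length_nil, Nat.zero_add]
      split_ifs <;> push_cast at * <;> omega

theorem feat1Loop_eq (l : List String) : feat1Loop l = l.any (fun t => wordlen_altB t > 2) := by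
  induction l with
  | nil => simp [feat1Loop]
  | cons t ts ih =>
    simp only [feat1Loop, ih, List.any_cons, wordlen_eq]
    split_ifs with h <;> simp [h]

-- ===== VERDICT (by name: the statement is the Claim_ definition above) =====
theorem feature_1_spec : Claim_equal_feature_1 := by
  intro tagstr _
  unfold Spec_feature_1 feature_1 feature_1_alt
  simp only [feat1Loop_eq]
  split_ifs with h
  · rfl
  · simp at h; simp [h]
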